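-- pv_equiv track=rewrite | github.com/khangn7/cspc217 | assignments/CPSC217S23A4Starter.py | part2
-- ===== SOURCE A (Python) =====
-- def part2(my_dict:dict) -> list:
--     """
--     Return possible patient zero(s) from contact records dict
--     patient zero is person who is sick but has not got it from anyone in my_dict
--     :param my_dict: dict, key sick_person : values (list) people who came in contact with key
--     :return: list of strs, names of possible patient zero(s)
--     """
--     patient_zeros = []
--
--     #process data to make list
--     for check_person in my_dict:
--         found_in_contacted = False
--
--         # loop through dict values for suspect
--
--         # break and continue not allowed bruh
--         # if breaks are used (uncommented) here, time is lower bound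
--         for key in my_dict:
--             for contacted in my_dict[key]:
--                 if contacted == check_person:
--                     found_in_contacted = True
--                     # break
--             # if found_in_contacted:
--             #     break
--
--         if not found_in_contacted:
--             patient_zeros.append(check_person)
--
--
--     return sorted(patient_zeros)
-- ===== SOURCE B (Python) =====
-- def part2(my_dict: dict) -> list:
--     candidates = set(my_dict)
--     for contacts in my_dict.values():
--         for name in contacts:
--             candidates.discard(name)
--     return sorted(candidates)
-- ===== Notes on version B (the rewrite author's own statement) =====
-- stated objective: faster
-- what changed: Instead of testing each sick person against every contact of every record (nested rescans), B starts from the set of all keys and eliminates each contacted name in one pass over the contact lists, then sorts the survivors.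
import Mathlib
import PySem

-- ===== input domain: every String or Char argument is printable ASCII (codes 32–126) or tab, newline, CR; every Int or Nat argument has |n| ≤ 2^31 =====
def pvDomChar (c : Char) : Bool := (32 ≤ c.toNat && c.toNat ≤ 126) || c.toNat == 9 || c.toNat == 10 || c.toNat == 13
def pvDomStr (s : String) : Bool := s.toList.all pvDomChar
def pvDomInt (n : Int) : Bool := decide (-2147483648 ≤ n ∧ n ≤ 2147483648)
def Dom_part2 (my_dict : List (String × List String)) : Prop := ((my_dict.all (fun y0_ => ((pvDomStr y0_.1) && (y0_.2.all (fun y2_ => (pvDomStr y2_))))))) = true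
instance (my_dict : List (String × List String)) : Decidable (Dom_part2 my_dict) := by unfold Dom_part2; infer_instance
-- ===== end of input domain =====

-- B replaces A's per-person rescan of every contact list by a single elimination pass
-- over the contacts that shrinks a candidate set of all keys (objective: faster).

-- ===== PORT A =====
def part2 (my_dict : List (String × List String)) : List String :=
  let d := PySem.Dict.ofList my_dict
  let patient_zeros := d.keys.foldl (fun pz check_person =>
    let found := d.keys.foldl (fun f key =>
      (d.getD key []).foldl (fun f contacted =>
        if contacted == check_person then true else f) f) false
    if !found then pz ++ [check_person] else pz) []
  PySem.List.sorted patient_zeros (fun x => x) false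

-- ===== PORT B =====
def part2_alt (my_dict : List (String × List String)) : List String :=
  let d := PySem.Dict.ofList my_dict
  let candidates := d.values.foldl (fun s contacts =>
      contacts.foldl (fun s name => PySem.Set.discard s name) s)
    (PySem.Set.ofList d.keys)
  PySem.List.sorted candidates (fun x => x) false

-- ===== PRECONDITION & SPEC =====
def Spec_part2 (my_dict : List (String × List String)) (out : List String) : Prop := out = part2_alt my_dict
instance (my_dict : List (String × List String)) (out : List String) : Decidable (Spec_part2 my_dict out) := by unfold Spec_part2; infer_instance

-- ===== CLAIM (what is proved, stated in full; the proofs are below) =====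
def Claim_equal_part2 : Prop := ∀ (my_dict : List (String × List String)), Dom_part2 my_dict → Spec_part2 my_dict (part2 my_dict)

-- ===== LEMMAS AND PROOFS =====

-- A's inner flag loop over one contact list: it ends true iff it started true or the person occurs.
theorem foldl_found_flag (contacts : List String) (c : String) (f : Bool) :
    contacts.foldl (fun f contacted => if contacted == c then true else f) f
      = (f || contacts.contains c) := by
  induction contacts generalizing f with
  | nil => simp
  | cons x xs ih =>
      simp only [List.foldl_cons, ih, List.contains_cons]
      by_cases h : x = c
      · subst h; simp
      · have hb : (x == c) = false := by simp [h]
        have hb2 : (c == x) = false := by simp [Ne.symm h]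
        simp [hb, hb2]

-- A's outer flag loop over the keys: disjunction over the keys.
theorem foldl_or_any {α : Type} (g : α → Bool) (l : List α) (b : Bool) :
    l.foldl (fun f k => f || g k) b = (b || l.any g) := by
  induction l generalizing b with
  | nil => simp
  | cons x xs ih => simp [ih, Bool.or_assoc]

-- B's inner loop: discarding every name of one contact list filters them all out.
theorem foldl_discard (l : List String) (s : PySem.Set String) :
    l.foldl (fun s name => PySem.Set.discard s name) s
      = s.filter (fun x => !(l.contains x)) := by
  induction l generalizing s with
  | nil => simp
  | cons a t ih =>
      rw [List.foldl_cons, ih]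
      simp only [PySem.Set.discard, List.filter_filter, List.contains_cons]
      apply List.filter_congr
      intro x _
      by_cases h : x = a <;> simp [h, Bool.and_comm]

-- B's outer loop over the value lists: filters out everything contacted anywhere.
theorem foldl_discard_all (vs : List (List String)) (s : PySem.Set String) :
    vs.foldl (fun s contacts => contacts.foldl (fun s name => PySem.Set.discard s name) s) s
      = s.filter (fun x => !(vs.flatten.contains x)) := by
  induction vs generalizing s with
  | nil => simp
  | cons v t ih =>
      rw [List.foldl_cons, foldl_discard, ih]
      simp only [List.filter_filter, List.flatten_cons]
      apply List.filter_congr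
      intro x _
      simp [Bool.not_or, Bool.and_comm]

-- Looking every key of a dict up again yields exactly its value list (keys are unique).
theorem map_getD_keys {ν : Type} (d : PySem.Dict String ν) (dflt : ν) (h : d.keys.Nodup) :
    d.keys.map (fun k => d.getD k dflt) = d.values := by
  obtain ⟨items⟩ := d
  induction items with
  | nil => rfl
  | cons p t ih =>
      obtain ⟨k, v⟩ := p
      simp only [PySem.Dict.keys, List.map_cons, List.nodup_cons, List.mem_map] at h
      obtain ⟨hk, ht⟩ := h
      simp only [PySem.Dict.keys, PySem.Dict.values, List.map_cons, List.map_map]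
      congr 1
      · simp [PySem.Dict.getD, PySem.Dict.get?]
      · have h2 := ih ht
        simp only [PySem.Dict.keys, PySem.Dict.values, List.map_map] at h2
        rw [← h2]
        apply List.map_congr_left
        intro x hx
        have hxk : ((k, v).1 == x.1) = false := by
          simp only [beq_eq_false_iff_ne, ne_eq]
          intro e
          exact hk ⟨x, hx, e.symm⟩
        simp [Function.comp, PySem.Dict.getD, PySem.Dict.get?, hxk]

-- Both programs compute sorted(keys minus all contacted names).
theorem parts_eq (my_dict : List (String × List String)) :
    part2 my_dict = part2_alt my_dict := by
  unfold part2 part2_alt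
  have hnd : (PySem.Dict.ofList my_dict).keys.Nodup := PySem.Dict.nodup_keys_ofList my_dict
  simp only [foldl_found_flag, foldl_or_any, Bool.false_or, PySem.List.foldl_append_if,
    List.nil_append, List.map_id_fun', id, foldl_discard_all,
    PySem.Set.ofList_eq_self_of_nodup _ hnd]
  apply congrArg (fun l => PySem.List.sorted l (fun x => x) false)
  apply List.filter_congr
  intro c _
  rw [List.contains_flatten, ← map_getD_keys (PySem.Dict.ofList my_dict) [] hnd, List.any_map]
  rfl

-- ===== VERDICT (by name: the statement is the Claim_ definition above) =====
theorem part2_spec : Claim_equal_part2 := by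
  intro my_dict _
  unfold Spec_part2
  exact parts_eq my_dict
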